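-- pv_equiv track=rewrite | github.com/kocsismhly/advent-of-code | 2023/day-03/23-03-solution.py | get_number_from_partial_index
-- ===== SOURCE A (Python) =====
-- def get_number_from_partial_index(row: str, partial_index: int) -> int:
--     """
--     Finds the number from a known index.
--     This function is used for the second part.
--
--     row = 'onetwothree159fourfive'
--     partial_index = 12 (which is a 5)
--     found_number = 159
--
--     :param row: Row which contains the number we are looking for
--     :param partial_index: Index where we found a digit
--     :return: Found whole number
--     """
--     start_index = partial_index
--     while start_index > 0 and row[start_index - 1].isdigit():
--         start_index -= 1
--
--     end_index = partial_index
--     while end_index < len(row) - 1 and row[end_index + 1].isdigit():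
--         end_index += 1
--
--     return int(row[start_index:end_index + 1])
-- ===== SOURCE B (Python) =====
-- def get_number_from_partial_index(row: str, partial_index: int) -> int:
--     """Single left-to-right scan: collect all maximal digit runs as (start, end)
--     spans, then return the int of the run containing partial_index."""
--     runs = []
--     start = None
--     for i, ch in enumerate(row):
--         if ch.isdigit():
--             if start is None:
--                 start = i
--         else:
--             if start is not None:
--                 runs.append((start, i - 1))
--                 start = None
--     if start is not None:
--         runs.append((start, len(row) - 1))
--     for s, e in runs:
--         if s <= partial_index <= e:
--             return int(row[s:e + 1])
--     return int(row[partial_index:partial_index + 1])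
-- ===== Notes on version B (the rewrite author's own statement) =====
-- stated objective: alternative
-- what changed: B makes one left-to-right scan of the row collecting every maximal digit run as a (start,end) span and then returns int() of the run containing partial_index, instead of A's two while-loops expanding left and right from the index.
-- outside the precondition, e.g. on get_number_from_partial_index(' 7', 0): A returns 7, B raises ValueError; on get_number_from_partial_index('12', 2): A returns 12, B raises ValueError; on get_number_from_partial_index('159', -1): A returns 9, B raises ValueError
import Mathlib
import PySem

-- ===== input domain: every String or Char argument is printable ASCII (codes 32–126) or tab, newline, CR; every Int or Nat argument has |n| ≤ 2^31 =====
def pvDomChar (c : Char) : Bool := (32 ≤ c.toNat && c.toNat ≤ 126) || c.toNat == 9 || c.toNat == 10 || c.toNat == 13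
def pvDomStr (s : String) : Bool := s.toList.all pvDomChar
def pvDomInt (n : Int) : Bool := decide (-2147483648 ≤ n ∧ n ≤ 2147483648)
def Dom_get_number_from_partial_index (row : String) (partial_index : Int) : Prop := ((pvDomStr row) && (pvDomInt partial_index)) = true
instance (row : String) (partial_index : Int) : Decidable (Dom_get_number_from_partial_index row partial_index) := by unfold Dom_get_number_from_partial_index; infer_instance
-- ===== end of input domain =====

-- B replaces A's two expanding while-loops by one left-to-right scan that collects all
-- maximal digit runs and selects the run containing the index (alternative decomposition,
-- same return values on Pre_; neither implementation mutates anything).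

-- ===== PORT A =====
-- row[i].isdigit(); pyGet? = none is an IndexError in Python, excluded by Pre_ (loop stops here)
def pvDigitAt (l : List Char) (i : Int) : Bool :=
  ((PySem.List.pyGet? l i).map PySem.Chars.isdigit).getD false

-- while start_index > 0 and row[start_index - 1].isdigit(): start_index -= 1
def findStartA (l : List Char) (s : Int) : Int :=
  if h : 0 < s ∧ pvDigitAt l (s - 1) = true then findStartA l (s - 1) else s
termination_by s.toNat
decreasing_by omega

-- while end_index < len(row) - 1 and row[end_index + 1].isdigit(): end_index += 1
def findEndA (l : List Char) (e : Int) : Int :=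
  if h : e < (l.length : Int) - 1 ∧ pvDigitAt l (e + 1) = true then findEndA l (e + 1) else e
termination_by ((l.length : Int) - e).toNat
decreasing_by omega

def get_number_from_partial_index (row : String) (partial_index : Int) : Int :=
  let l := row.toList
  let s := findStartA l partial_index
  let e := findEndA l partial_index
  -- int(row[start_index:end_index + 1]); ValueError (= none) is excluded by Pre_
  (PySem.Int.ofChars? (PySem.List.slice l (some s) (some (e + 1)))).getD 0

-- ===== PORT B =====
-- loop body of B's scan: state = (runs so far, start of the open run if any)
def runStep (acc : List (Int × Int) × Option Int) (ic : Int × Char) : List (Int × Int) × Option Int :=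
  if PySem.Chars.isdigit ic.2 then
    match acc.2 with
    | none => (acc.1, some ic.1)
    | some s => (acc.1, some s)
  else
    match acc.2 with
    | none => (acc.1, none)
    | some s => (acc.1 ++ [(s, ic.1 - 1)], none)

def collectRuns (l : List Char) : List (Int × Int) :=
  let st := (PySem.List.enumerate l 0).foldl runStep ([], none)
  match st.2 with
  | some s => st.1 ++ [(s, (l.length : Int) - 1)]
  | none => st.1

-- for s, e in runs: if s <= partial_index <= e: return …
def findRun (runs : List (Int × Int)) (p : Int) : Option (Int × Int) :=
  match runs with
  | [] => none
  | r :: rs => if r.1 ≤ p ∧ p ≤ r.2 then some r else findRun rs p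

def get_number_from_partial_index_alt (row : String) (partial_index : Int) : Int :=
  let l := row.toList
  match findRun (collectRuns l) partial_index with
  | some (s, e) => (PySem.Int.ofChars? (PySem.List.slice l (some s) (some (e + 1)))).getD 0
  | none => (PySem.Int.ofChars? (PySem.List.slice l (some partial_index) (some (partial_index + 1)))).getD 0

-- ===== PRECONDITION & SPEC =====
-- Pre_ restricts to the function's stated contract: partial_index is an in-range index of a digit.
-- Outside it A either raises (IndexError past the end, ValueError when int() fails) or returns
-- values that are accidents of slicing (whitespace/sign absorbed by int(), negative-index
-- wraparound, index == len with trailing digits), on which B's own algorithm raises ValueError.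
def Pre_get_number_from_partial_index (row : String) (partial_index : Int) : Prop :=
  0 ≤ partial_index ∧ partial_index.toNat < row.toList.length ∧
    PySem.Chars.isdigit (row.toList.getD partial_index.toNat ' ') = true
instance (row : String) (partial_index : Int) : Decidable (Pre_get_number_from_partial_index row partial_index) := by unfold Pre_get_number_from_partial_index; infer_instance

def pvWitness_get_number_from_partial_index : String × Int := ("a159b", 2)

def Spec_get_number_from_partial_index (row : String) (partial_index : Int) (out : Int) : Prop := out = get_number_from_partial_index_alt row partial_index
instance (row : String) (partial_index : Int) (out : Int) : Decidable (Spec_get_number_from_partial_index row partial_index out) := by unfold Spec_get_number_from_partial_index; infer_instance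

-- ===== CLAIM (what is proved, stated in full; the proofs are below) =====
def Claim_equal_get_number_from_partial_index : Prop := ∀ (row : String) (partial_index : Int), Dom_get_number_from_partial_index row partial_index → Pre_get_number_from_partial_index row partial_index → Spec_get_number_from_partial_index row partial_index (get_number_from_partial_index row partial_index)

-- ===== LEMMAS AND PROOFS =====

-- abbreviations: length of the digit prefix / digit stretch left and right of position p
def pvTW (xs : List Char) : Nat := (xs.takeWhile PySem.Chars.isdigit).length

def pvLeft (l : List Char) (p : Nat) : Nat := pvTW ((l.take p).reverse)

def pvRight (l : List Char) (p : Nat) : Nat := pvTW (l.drop (p + 1))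

lemma tw_le (xs : List Char) : pvTW xs ≤ xs.length :=
  (List.takeWhile_sublist (l := xs) (p := PySem.Chars.isdigit)).length_le

lemma tw_cons_pos (c : Char) (cs : List Char) (h : PySem.Chars.isdigit c = true) :
    pvTW (c :: cs) = pvTW cs + 1 := by
  simp [pvTW, h]

lemma tw_cons_neg (c : Char) (cs : List Char) (h : PySem.Chars.isdigit c = false) :
    pvTW (c :: cs) = 0 := by
  simp [pvTW, h]

lemma tw_all (xs : List Char) (i : Nat) (h : i < pvTW xs) :
    PySem.Chars.isdigit (xs.getD i ' ') = true := by
  induction xs generalizing i with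
  | nil => simp [pvTW] at h
  | cons c cs ih =>
    by_cases hc : PySem.Chars.isdigit c = true
    · cases i with
      | zero => simpa using hc
      | succ j =>
        rw [tw_cons_pos c cs hc] at h
        simpa using ih j (by omega)
    · rw [tw_cons_neg c cs (by simpa using hc)] at h; omega

lemma tw_stop (xs : List Char) (h : pvTW xs < xs.length) :
    PySem.Chars.isdigit (xs.getD (pvTW xs) ' ') = false := by
  induction xs with
  | nil => simp at h
  | cons c cs ih =>
    by_cases hc : PySem.Chars.isdigit c = true
    · rw [tw_cons_pos c cs hc] at h ⊢
      simpa using ih (by simpa using h)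
    · rw [tw_cons_neg c cs (by simpa using hc)] at h ⊢
      simpa using (by simpa using hc : PySem.Chars.isdigit c = false)

lemma tw_full (xs : List Char) (h : ∀ j, j < xs.length → PySem.Chars.isdigit (xs.getD j ' ') = true) :
    pvTW xs = xs.length := by
  by_contra hne
  have hlt : pvTW xs < xs.length := lt_of_le_of_ne (tw_le xs) hne
  have := tw_stop xs hlt
  rw [h _ hlt] at this
  simp at this

lemma tw_append (u v : List Char) :
    pvTW (u ++ v) = if pvTW u = u.length then u.length + pvTW v else pvTW u := by
  induction u with
  | nil => simp [pvTW]
  | cons c cs ih =>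
    by_cases hc : PySem.Chars.isdigit c = true
    · rw [List.cons_append, tw_cons_pos c _ hc, tw_cons_pos c cs hc, ih]
      by_cases h : pvTW cs = cs.length
      · rw [if_pos h, if_pos (by simp [h]), List.length_cons]; omega
      · rw [if_neg h, if_neg (by simp [List.length_cons]; omega)]
    · have hc' : PySem.Chars.isdigit c = false := by simpa using hc
      rw [List.cons_append, tw_cons_neg c _ hc', tw_cons_neg c cs hc',
        if_neg (by simp [List.length_cons])]

lemma tw_drop (xs : List Char) (k : Nat) (h : k ≤ pvTW xs) :
    pvTW xs = k + pvTW (xs.drop k) := by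
  induction k generalizing xs with
  | zero => simp
  | succ j ih =>
    cases xs with
    | nil => simp [pvTW] at h ⊢
    | cons c cs =>
      have hc : PySem.Chars.isdigit c = true := by
        by_contra hc
        rw [tw_cons_neg c cs (by simpa using hc)] at h; omega
      rw [tw_cons_pos c cs hc] at h ⊢
      have := ih cs (by omega)
      rw [List.drop_succ_cons]
      omega

lemma getD_drop (xs : List Char) (k j : Nat) (h : k + j < xs.length) :
    (xs.drop k).getD j ' ' = xs.getD (k + j) ' ' := by
  rw [List.getD_eq_getElem _ _ (by simp; omega), List.getD_eq_getElem _ _ h]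
  exact List.getElem_drop

lemma rev_take_getD (l : List Char) (p j : Nat) (hj : j < p) (hp : p ≤ l.length) :
    ((l.take p).reverse).getD (p - 1 - j) ' ' = l.getD j ' ' := by
  have hlen : (l.take p).length = p := by simp; omega
  rw [List.getD_eq_getElem _ _ (by simp [hlen]; omega),
    List.getD_eq_getElem _ _ (by omega : j < l.length)]
  rw [List.getElem_reverse]
  have h1 : (l.take p).length - 1 - (p - 1 - j) = j := by rw [hlen]; omega
  simp only [h1]
  exact List.getElem_take

-- facts about the maximal digit run around a digit position p
lemma pvLeft_le (l : List Char) (p : Nat) (hp : p ≤ l.length) : pvLeft l p ≤ p := by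
  have := tw_le ((l.take p).reverse)
  simpa [pvLeft, List.length_reverse, List.length_take, Nat.min_eq_left hp] using this

lemma digit_left (l : List Char) (p j : Nat) (hp : p ≤ l.length)
    (h1 : p - pvLeft l p ≤ j) (h2 : j < p) :
    PySem.Chars.isdigit (l.getD j ' ') = true := by
  have hle := pvLeft_le l p hp
  have h := tw_all ((l.take p).reverse) (p - 1 - j) (by unfold pvLeft at *; omega)
  rwa [rev_take_getD l p j h2 hp] at h

lemma digit_left_stop (l : List Char) (p : Nat) (hp : p ≤ l.length)
    (h : 0 < p - pvLeft l p) :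
    PySem.Chars.isdigit (l.getD (p - pvLeft l p - 1) ' ') = false := by
  have hle := pvLeft_le l p hp
  have hlt : pvLeft l p < ((l.take p).reverse).length := by
    simp [List.length_reverse, List.length_take]; omega
  have hstop := tw_stop ((l.take p).reverse) hlt
  rw [show pvTW ((l.take p).reverse) = pvLeft l p from rfl] at hstop
  have hj : (p - 1 - (p - pvLeft l p - 1)) = pvLeft l p := by omega
  have := rev_take_getD l p (p - pvLeft l p - 1) (by omega) hp
  rw [hj] at this
  rwa [this] at hstop

lemma pvRight_bound (l : List Char) (p : Nat) (hp : p < l.length) :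
    p + pvRight l p < l.length := by
  have := tw_le (l.drop (p + 1))
  simp only [List.length_drop] at this
  unfold pvRight
  omega

lemma digit_right (l : List Char) (p j : Nat) (hp : p < l.length)
    (h1 : p < j) (h2 : j ≤ p + pvRight l p) :
    PySem.Chars.isdigit (l.getD j ' ') = true := by
  have h := tw_all (l.drop (p + 1)) (j - p - 1) (by unfold pvRight at *; omega)
  have hb := pvRight_bound l p hp
  rw [getD_drop l (p + 1) (j - p - 1) (by omega)] at h
  have : p + 1 + (j - p - 1) = j := by omega
  rwa [this] at h

lemma digit_right_stop (l : List Char) (p : Nat) (hp : p < l.length)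
    (h : p + pvRight l p + 1 < l.length) :
    PySem.Chars.isdigit (l.getD (p + pvRight l p + 1) ' ') = false := by
  have hlt : pvRight l p < (l.drop (p + 1)).length := by
    simp only [List.length_drop]; omega
  have hstop := tw_stop (l.drop (p + 1)) hlt
  rw [show pvTW (l.drop (p + 1)) = pvRight l p from rfl] at hstop
  rw [getD_drop l (p + 1) (pvRight l p) (by omega)] at hstop
  have : p + 1 + pvRight l p = p + pvRight l p + 1 := by omega
  rwa [this] at hstop

-- ----- A side -----

lemma pvDigitAt_nat (l : List Char) (j : Nat) (hj : j < l.length) :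
    pvDigitAt l (j : Int) = PySem.Chars.isdigit (l.getD j ' ') := by
  simp [pvDigitAt, PySem.List.pyGet?_natCast, List.getElem?_eq_getElem hj]

lemma findStartA_spec (l : List Char) (p : Nat) (hp : p < l.length) :
    ∀ k : Nat, p - pvLeft l p + k ≤ p →
      findStartA l (((p - pvLeft l p + k : Nat) : Int)) = ((p - pvLeft l p : Nat) : Int) := by
  intro k
  induction k with
  | zero =>
    intro _
    rw [findStartA, dif_neg]
    · norm_num
    rintro ⟨h0, hdig⟩
    have hs : 0 < p - pvLeft l p := by omega
    rw [show ((p - pvLeft l p + 0 : Nat) : Int) - 1 = ((p - pvLeft l p - 1 : Nat) : Int) by omega,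
      pvDigitAt_nat l _ (by omega)] at hdig
    rw [digit_left_stop l p (by omega) hs] at hdig
    exact Bool.false_ne_true hdig
  | succ j ih =>
    intro hk
    rw [findStartA, dif_pos]
    · rw [show ((p - pvLeft l p + (j + 1) : Nat) : Int) - 1 = ((p - pvLeft l p + j : Nat) : Int) by omega]
      exact ih (by omega)
    refine ⟨by omega, ?_⟩
    rw [show ((p - pvLeft l p + (j + 1) : Nat) : Int) - 1 = ((p - pvLeft l p + j : Nat) : Int) by omega,
      pvDigitAt_nat l _ (by omega)]
    exact digit_left l p _ (by omega) (by omega) (by omega)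

lemma findEndA_spec (l : List Char) (p : Nat) (hp : p < l.length) :
    ∀ k : Nat, k ≤ pvRight l p →
      findEndA l (((p + pvRight l p - k : Nat) : Int)) = ((p + pvRight l p : Nat) : Int) := by
  have hub := pvRight_bound l p hp
  intro k
  induction k with
  | zero =>
    intro _
    rw [findEndA, dif_neg]
    · norm_num
    rintro ⟨h0, hdig⟩
    have hlt : p + pvRight l p + 1 < l.length := by omega
    rw [show ((p + pvRight l p - 0 : Nat) : Int) + 1 = ((p + pvRight l p + 1 : Nat) : Int) by omega,
      pvDigitAt_nat l _ (by omega)] at hdig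
    rw [digit_right_stop l p hp hlt] at hdig
    exact Bool.false_ne_true hdig
  | succ j ih =>
    intro hk
    rw [findEndA, dif_pos]
    · rw [show ((p + pvRight l p - (j + 1) : Nat) : Int) + 1 = ((p + pvRight l p - j : Nat) : Int) by omega]
      exact ih (by omega)
    refine ⟨by omega, ?_⟩
    rw [show ((p + pvRight l p - (j + 1) : Nat) : Int) + 1 = ((p + pvRight l p - j : Nat) : Int) by omega,
      pvDigitAt_nat l _ (by omega)]
    exact digit_right l p _ hp (by omega) (by omega)

-- ----- B side -----

-- structural version of B's scan, for the proof
def runsAux : List Char → Int → Option Int → List (Int × Int)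
  | [], _, none => []
  | [], i, some s => [(s, i - 1)]
  | c :: cs, i, none =>
      if PySem.Chars.isdigit c then runsAux cs (i + 1) (some i) else runsAux cs (i + 1) none
  | c :: cs, i, some s =>
      if PySem.Chars.isdigit c then runsAux cs (i + 1) (some s)
      else (s, i - 1) :: runsAux cs (i + 1) none

lemma runsAux_cons_none_pos (c : Char) (cs : List Char) (i : Int)
    (hc : PySem.Chars.isdigit c = true) :
    runsAux (c :: cs) i none = runsAux cs (i + 1) (some i) := by
  simp [runsAux, hc]

lemma runsAux_cons_none_neg (c : Char) (cs : List Char) (i : Int)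
    (hc : PySem.Chars.isdigit c = false) :
    runsAux (c :: cs) i none = runsAux cs (i + 1) none := by
  simp [runsAux, hc]

lemma runsAux_cons_some_pos (c : Char) (cs : List Char) (i s : Int)
    (hc : PySem.Chars.isdigit c = true) :
    runsAux (c :: cs) i (some s) = runsAux cs (i + 1) (some s) := by
  simp [runsAux, hc]

lemma runsAux_cons_some_neg (c : Char) (cs : List Char) (i s : Int)
    (hc : PySem.Chars.isdigit c = false) :
    runsAux (c :: cs) i (some s) = (s, i - 1) :: runsAux cs (i + 1) none := by
  simp [runsAux, hc]

lemma fold_runsAux (xs : List Char) : ∀ (i : Int) (runs : List (Int × Int)) (st : Option Int),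
    (match ((PySem.List.enumerate xs i).foldl runStep (runs, st)) with
      | (rs, some s) => rs ++ [(s, i + (xs.length : Int) - 1)]
      | (rs, none) => rs) = runs ++ runsAux xs i st := by
  induction xs with
  | nil => intro i runs st; cases st <;> simp [PySem.List.enumerate_nil, runsAux]
  | cons c cs ih =>
    intro i runs st
    rw [PySem.List.enumerate_cons, List.foldl_cons,
      show i + ((c :: cs).length : Int) - 1 = (i + 1) + (cs.length : Int) - 1 by
        simp [List.length_cons]; push_cast; ring]
    by_cases hc : PySem.Chars.isdigit c = true
    · cases st with
      | none =>
        rw [show runStep (runs, none) (i, c) = (runs, some i) by simp [runStep, hc],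
          runsAux_cons_none_pos c cs i hc]
        exact ih (i + 1) runs (some i)
      | some s =>
        rw [show runStep (runs, some s) (i, c) = (runs, some s) by simp [runStep, hc],
          runsAux_cons_some_pos c cs i s hc]
        exact ih (i + 1) runs (some s)
    · have hc' : PySem.Chars.isdigit c = false := by simpa using hc
      cases st with
      | none =>
        rw [show runStep (runs, none) (i, c) = (runs, none) by simp [runStep, hc'],
          runsAux_cons_none_neg c cs i hc']
        exact ih (i + 1) runs none
      | some s =>
        rw [show runStep (runs, some s) (i, c) = (runs ++ [(s, i - 1)], none) by
            simp [runStep, hc'],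
          runsAux_cons_some_neg c cs i s hc']
        rw [ih (i + 1) (runs ++ [(s, i - 1)]) none]
        simp

lemma collectRuns_eq (l : List Char) : collectRuns l = runsAux l 0 none := by
  have h := fold_runsAux l 0 [] none
  rw [show (0 : Int) + (l.length : Int) - 1 = (l.length : Int) - 1 by ring,
    List.nil_append] at h
  rw [collectRuns]
  rcases hE : (PySem.List.enumerate l 0).foldl runStep ([], none) with ⟨rs, st⟩
  rw [hE] at h
  cases st <;> simpa using h

lemma runsAux_open (xs : List Char) : ∀ (i s : Int),
    runsAux xs i (some s) =
      (s, i - 1 + (pvTW xs : Int)) :: runsAux (xs.drop (pvTW xs)) (i + (pvTW xs : Int)) none := by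
  induction xs with
  | nil => intro i s; simp [runsAux, pvTW]
  | cons c cs ih =>
    intro i s
    by_cases hc : PySem.Chars.isdigit c = true
    · rw [runsAux_cons_some_pos c cs i s hc, ih (i + 1) s, tw_cons_pos c cs hc,
        show ((pvTW cs + 1 : Nat) : Int) = (pvTW cs : Int) + 1 by omega]
      rw [show i + 1 - 1 + (pvTW cs : Int) = i - 1 + ((pvTW cs : Int) + 1) by ring,
        show i + 1 + (pvTW cs : Int) = i + ((pvTW cs : Int) + 1) by ring,
        show List.drop (pvTW cs + 1) (c :: cs) = List.drop (pvTW cs) cs from List.drop_succ_cons]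
    · have hc' : PySem.Chars.isdigit c = false := by simpa using hc
      rw [runsAux_cons_some_neg c cs i s hc', tw_cons_neg c cs hc']
      simp [runsAux_cons_none_neg c cs i hc']

-- pvLeft over a non-digit head shifts by one
lemma pvLeft_cons (c : Char) (cs : List Char) (p : Nat) (hc : PySem.Chars.isdigit c = false)
    (hp : 1 ≤ p) :
    pvLeft (c :: cs) p = pvLeft cs (p - 1) := by
  obtain ⟨q, rfl⟩ : ∃ q, p = q + 1 := ⟨p - 1, by omega⟩
  unfold pvLeft
  rw [List.take_succ_cons, List.reverse_cons, tw_append]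
  rw [tw_cons_neg c [] hc]
  by_cases h : pvTW (List.take q cs).reverse = (List.take q cs).reverse.length
  · rw [if_pos h]; simp [h]
  · rw [if_neg h]; simp

-- pvLeft is unchanged by dropping everything up to a non-digit position t < p
lemma pvLeft_shift (l : List Char) (t p : Nat) (ht : t < p) (hp : p ≤ l.length)
    (hnd : PySem.Chars.isdigit (l.getD t ' ') = false) :
    pvLeft l p = pvLeft (l.drop t) (p - t) := by
  unfold pvLeft
  have hdec : List.take p l = List.take t l ++ List.take (p - t) (List.drop t l) := by
    rw [← List.take_add]; congr 1; omega
  rw [hdec, List.reverse_append, tw_append]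
  have hwlen : (List.take (p - t) (List.drop t l)).length = p - t := by
    simp [List.length_take, List.length_drop]; omega
  have hne : pvTW (List.take (p - t) (List.drop t l)).reverse ≠ (List.take (p - t) (List.drop t l)).reverse.length := by
    intro heq
    have hall := tw_all (List.take (p - t) (List.drop t l)).reverse (p - t - 1)
      (by rw [heq]; simp [hwlen]; omega)
    have hgd : (List.take (p - t) (List.drop t l)).reverse.getD (p - t - 1) ' ' = l.getD t ' ' := by
      rw [List.getD_eq_getElem _ _ (by simp [hwlen]; omega),
        List.getD_eq_getElem _ _ (by omega : t < l.length), List.getElem_reverse]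
      have h1 : (List.take (p - t) (List.drop t l)).length - 1 - (p - t - 1) = 0 := by
        rw [hwlen]; omega
      simp only [h1]
      simp [List.getElem_take, List.getElem_drop]
    rw [hgd, hnd] at hall
    exact Bool.false_ne_true hall
  rw [if_neg hne]

-- pvRight over dropping t ≤ p positions
lemma pvRight_shift (l : List Char) (t p : Nat) (ht : t ≤ p) :
    pvRight l p = pvRight (l.drop t) (p - t) := by
  unfold pvRight
  rw [List.drop_drop, show t + (p - t + 1) = p + 1 from by omega]

-- all positions below p are digits → the run extends to the start
lemma pvLeft_full (l : List Char) (p : Nat) (hp : p ≤ l.length)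
    (h : ∀ j, j < p → PySem.Chars.isdigit (l.getD j ' ') = true) :
    pvLeft l p = p := by
  unfold pvLeft
  have hlen : ((l.take p).reverse).length = p := by simp [List.length_take]; omega
  rw [tw_full _ ?_, hlen]
  intro j hj
  rw [hlen] at hj
  have hrw := rev_take_getD l p (p - 1 - j) (by omega) hp
  rw [show p - 1 - (p - 1 - j) = j from by omega] at hrw
  rw [hrw]
  exact h _ (by omega)

lemma findRun_runsAux : ∀ (n : Nat) (xs : List Char), xs.length ≤ n → ∀ (p : Nat) (i : Int),
    p < xs.length → PySem.Chars.isdigit (xs.getD p ' ') = true →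
    findRun (runsAux xs i none) (i + (p : Int)) =
      some (i + ((p - pvLeft xs p : Nat) : Int), i + ((p + pvRight xs p : Nat) : Int)) := by
  intro n
  induction n with
  | zero => intro xs h p i hp _; omega
  | succ m ih =>
    intro xs hlen p i hp hd
    cases xs with
    | nil => simp at hp
    | cons c cs =>
      by_cases hc : PySem.Chars.isdigit c = true
      · -- head is a digit: the first run is (i, i + pvTW cs); t := pvTW cs + 1 = pvTW (c::cs)
        rw [runsAux_cons_none_pos c cs i hc, runsAux_open cs (i + 1) i]
        by_cases hpt : p ≤ pvTW cs
        · -- p lies inside the first run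
          rw [findRun, if_pos (by constructor <;> [omega; · simp only; omega])]
          have htall : ∀ j, j < p → PySem.Chars.isdigit ((c :: cs).getD j ' ') = true := by
            intro j hj
            have : j < pvTW (c :: cs) := by rw [tw_cons_pos c cs hc]; omega
            exact tw_all (c :: cs) j this
          have hL : pvLeft (c :: cs) p = p := pvLeft_full (c :: cs) p (by omega) htall
          have hR : p + pvRight (c :: cs) p = pvTW cs := by
            have hdrop := tw_drop (c :: cs) (p + 1) (by rw [tw_cons_pos c cs hc]; omega)
            rw [tw_cons_pos c cs hc] at hdrop
            unfold pvRight
            omega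
          rw [hL, hR]
          simp only [Option.some.injEq, Prod.mk.injEq]
          constructor <;> omega
        · -- p lies beyond the first run: recurse into the rest
          have hplen : p ≤ cs.length := by simpa [List.length_cons] using Nat.lt_succ_iff.mp hp
          have htlt : pvTW cs < cs.length := by omega
          have hnd : PySem.Chars.isdigit (cs.getD (pvTW cs) ' ') = false := tw_stop cs htlt
          have hpgt : pvTW cs + 1 < p := by
            rcases Nat.lt_or_ge (pvTW cs + 1) p with h | h
            · exact h
            · exfalso
              have hpe : p = pvTW cs + 1 := by omega
              rw [hpe, List.getD_cons_succ] at hd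
              rw [hd] at hnd
              simp at hnd
          rw [findRun, if_neg (by simp only; omega)]
          have hih := ih (cs.drop (pvTW cs)) (by simp [List.length_drop, List.length_cons] at *; omega)
            (p - 1 - pvTW cs) (i + 1 + (pvTW cs : Int))
            (by simp [List.length_drop]; omega)
            (by rw [getD_drop cs (pvTW cs) _ (by omega),
                  show pvTW cs + (p - 1 - pvTW cs) = p - 1 by omega]
                rw [show cs.getD (p - 1) ' ' = (c :: cs).getD p ' ' by
                  obtain ⟨q, hq⟩ : ∃ q, p = q + 1 := ⟨p - 1, by omega⟩
                  subst hq; simp]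
                exact hd)
          rw [show i + (p : Int) = i + 1 + (pvTW cs : Int) + ((p - 1 - pvTW cs : Nat) : Int) by omega]
          rw [hih]
          -- translate pvLeft/pvRight across the dropped block
          have hdropeq : cs.drop (pvTW cs) = (c :: cs).drop (pvTW cs + 1) := by
            rw [List.drop_succ_cons]
          have hndl : PySem.Chars.isdigit ((c :: cs).getD (pvTW cs + 1) ' ') = false := by
            rwa [List.getD_cons_succ]
          have hLs : pvLeft (c :: cs) p = pvLeft (cs.drop (pvTW cs)) (p - 1 - pvTW cs) := by
            rw [pvLeft_shift (c :: cs) (pvTW cs + 1) p hpgt (by omega) hndl, hdropeq]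
            congr 1
            omega
          have hRs : pvRight (c :: cs) p = pvRight (cs.drop (pvTW cs)) (p - 1 - pvTW cs) := by
            rw [pvRight_shift (c :: cs) (pvTW cs + 1) p (by omega), hdropeq]
            congr 1
            omega
          have hLle := pvLeft_le (cs.drop (pvTW cs)) (p - 1 - pvTW cs)
            (by simp [List.length_drop]; omega)
          simp only [Option.some.injEq, Prod.mk.injEq]
          constructor <;> [rw [hLs]; rw [hRs]] <;> omega
      · -- head is not a digit: everything shifts by one
        have hc' : PySem.Chars.isdigit c = false := by simpa using hc
        have hp0 : 1 ≤ p := by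
          rcases Nat.eq_zero_or_pos p with h | h
          · subst h; simp at hd; rw [hd] at hc'; exact absurd hc' (by simp)
          · exact h
        rw [runsAux_cons_none_neg c cs i hc']
        have hih := ih cs (by simpa [List.length_cons] using Nat.le_of_succ_le_succ hlen)
          (p - 1) (i + 1) (by simp [List.length_cons] at hp; omega)
          (by rw [show cs.getD (p - 1) ' ' = (c :: cs).getD p ' ' by
                obtain ⟨q, hq⟩ : ∃ q, p = q + 1 := ⟨p - 1, by omega⟩
                subst hq; simp]
              exact hd)
        rw [show i + (p : Int) = i + 1 + ((p - 1 : Nat) : Int) by omega, hih]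
        have hLs : pvLeft (c :: cs) p = pvLeft cs (p - 1) := pvLeft_cons c cs p hc' hp0
        have hRs : pvRight (c :: cs) p = pvRight cs (p - 1) := by
          unfold pvRight
          rw [show p + 1 = (p - 1 + 1) + 1 by omega, List.drop_succ_cons]
        have hLle := pvLeft_le cs (p - 1) (by simp [List.length_cons] at hp; omega)
        simp only [Option.some.injEq, Prod.mk.injEq]
        constructor <;> [rw [hLs]; rw [hRs]] <;> omega

-- ===== VERDICT (by name: the statement is the Claim_ definition above) =====
theorem get_number_from_partial_index_spec : Claim_equal_get_number_from_partial_index := by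
  unfold Claim_equal_get_number_from_partial_index
  intro row pi _ hpre
  obtain ⟨h0, hlen, hdig⟩ := hpre
  unfold Spec_get_number_from_partial_index
  set l := row.toList with hl
  set p := pi.toNat with hp
  have hpi : pi = (p : Int) := (Int.toNat_of_nonneg h0).symm
  have hLle := pvLeft_le l p (le_of_lt hlen)
  have hRub := pvRight_bound l p hlen
  have hA1 : findStartA l pi = ((p - pvLeft l p : Nat) : Int) := by
    have := findStartA_spec l p hlen (pvLeft l p) (by omega)
    rwa [show ((p - pvLeft l p + pvLeft l p : Nat) : Int) = pi by omega] at this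
  have hA2 : findEndA l pi = ((p + pvRight l p : Nat) : Int) := by
    have := findEndA_spec l p hlen (pvRight l p) (by omega)
    rwa [show ((p + pvRight l p - pvRight l p : Nat) : Int) = pi by omega] at this
  have hB : findRun (collectRuns l) pi =
      some (((p - pvLeft l p : Nat) : Int), ((p + pvRight l p : Nat) : Int)) := by
    rw [collectRuns_eq]
    have := findRun_runsAux l.length l le_rfl p 0 hlen hdig
    rw [show (0 : Int) + (p : Int) = pi by omega] at this
    rw [this]
    norm_num
  simp only [get_number_from_partial_index, get_number_from_partial_index_alt, ← hl, hA1, hA2, hB]
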